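-- pv_equiv track=rewrite | github.com/harrynp/ICS32 | project4/othello.py | _new_game_board
-- ===== SOURCE A (Python) =====
-- NONE = ' '
--
-- BLACK = 'B'
--
-- WHITE = 'W'
--
-- BOARD_COLUMNS = 8
--
-- BOARD_ROWS = 8
--
-- def _new_game_board(reverse:str)->list:
--     '''Creates a new game board.  Initially, a game board has the size
--     BOARD_COLUMNS x BOARD_ROWS and is comprised only of strings with the
--     value NONE and the 4 middle spaces with the strings BLACK and WHITE'''
--     board = []
--     if reverse=='False':
--         for col in range(BOARD_COLUMNS):
--             board.append([])
--             for row in range(BOARD_ROWS):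
--                 board[-1].append(NONE)
--         board[BOARD_COLUMNS//2][BOARD_ROWS//2]=WHITE
--         board[(BOARD_COLUMNS//2)-1][(BOARD_ROWS//2)-1]=WHITE
--         board[(BOARD_COLUMNS//2)-1][BOARD_ROWS//2]=BLACK
--         board[BOARD_COLUMNS//2][(BOARD_ROWS//2)-1]=BLACK
--     elif reverse=='True':
--         for col in range(BOARD_COLUMNS):
--             board.append([])
--             for row in range(BOARD_ROWS):
--                 board[-1].append(NONE)
--         board[BOARD_COLUMNS//2][BOARD_ROWS//2]=BLACK
--         board[(BOARD_COLUMNS//2)-1][(BOARD_ROWS//2)-1]=BLACK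
--         board[(BOARD_COLUMNS//2)-1][BOARD_ROWS//2]=WHITE
--         board[BOARD_COLUMNS//2][(BOARD_ROWS//2)-1]=WHITE
--     return board
-- ===== SOURCE B (Python) =====
-- NONE = ' '
-- BLACK = 'B'
-- WHITE = 'W'
-- BOARD_COLUMNS = 8
-- BOARD_ROWS = 8
--
-- def _new_game_board(reverse: str) -> list:
--     # Assemble the board from ready-made columns: blank side columns plus the
--     # two centre columns, each spliced from a blank column and a 2-piece string.
--     pieces = {'False': WHITE + BLACK, 'True': BLACK + WHITE}.get(reverse)
--     if pieces is None:
--         return []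
--     blank = [NONE] * BOARD_ROWS
--     h = BOARD_ROWS // 2
--     side = BOARD_COLUMNS // 2 - 1
--     def centre_col(top, bottom):
--         return blank[:h - 1] + [top, bottom] + blank[h + 1:]
--     return ([list(blank) for _ in range(side)]
--             + [centre_col(pieces[0], pieces[1]), centre_col(pieces[1], pieces[0])]
--             + [list(blank) for _ in range(side)])
-- ===== Notes on version B (the rewrite author's own statement) =====
-- stated objective: alternative
-- what changed: B assembles the board by list concatenation from precomputed whole columns (blank side columns plus two centre columns spliced from a blank column and a 2-piece string), with no per-cell loops or index assignments, instead of A's fill-with-NONE nested loops followed by four in-place overwrites in two duplicated branches.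
import Mathlib
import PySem

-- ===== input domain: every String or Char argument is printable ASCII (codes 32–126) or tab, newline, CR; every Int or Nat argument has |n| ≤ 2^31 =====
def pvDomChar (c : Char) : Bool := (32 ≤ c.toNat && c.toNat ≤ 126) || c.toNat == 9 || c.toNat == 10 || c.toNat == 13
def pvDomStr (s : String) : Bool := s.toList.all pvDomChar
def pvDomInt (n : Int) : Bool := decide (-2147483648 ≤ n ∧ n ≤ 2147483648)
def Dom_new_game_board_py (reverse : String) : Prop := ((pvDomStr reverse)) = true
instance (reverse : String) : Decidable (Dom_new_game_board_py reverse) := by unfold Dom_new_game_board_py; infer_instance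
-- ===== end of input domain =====

-- B builds the board by concatenating precomputed whole columns instead of A's fill-then-overwrite nested loops (objective: alternative).

-- ===== PORT A =====
-- board[i][j] = v for the literal nonnegative indices A uses (i, j ∈ {3, 4}); exact for in-range nonnegative indices
def pvSetCell (b : List (List String)) (i j : Nat) (v : String) : List (List String) :=
  b.set i ((b.getD i []).set j v)

def new_game_board_py (reverse : String) : List (List String) :=
  let board : List (List String) := []
  if reverse = "False" then
    -- for col in range(BOARD_COLUMNS): board.append([]); for row in range(BOARD_ROWS): board[-1].append(NONE)
    let board := (PySem.List.pyRange 0 8 1).foldl (fun b _ =>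
      b ++ [(PySem.List.pyRange 0 8 1).foldl (fun r _ => r ++ [" "]) []]) board
    let board := pvSetCell board (PySem.Int.floordiv 8 2).toNat (PySem.Int.floordiv 8 2).toNat "W"
    let board := pvSetCell board ((PySem.Int.floordiv 8 2) - 1).toNat ((PySem.Int.floordiv 8 2) - 1).toNat "W"
    let board := pvSetCell board ((PySem.Int.floordiv 8 2) - 1).toNat (PySem.Int.floordiv 8 2).toNat "B"
    let board := pvSetCell board (PySem.Int.floordiv 8 2).toNat ((PySem.Int.floordiv 8 2) - 1).toNat "B"
    board
  else if reverse = "True" then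
    let board := (PySem.List.pyRange 0 8 1).foldl (fun b _ =>
      b ++ [(PySem.List.pyRange 0 8 1).foldl (fun r _ => r ++ [" "]) []]) board
    let board := pvSetCell board (PySem.Int.floordiv 8 2).toNat (PySem.Int.floordiv 8 2).toNat "B"
    let board := pvSetCell board ((PySem.Int.floordiv 8 2) - 1).toNat ((PySem.Int.floordiv 8 2) - 1).toNat "B"
    let board := pvSetCell board ((PySem.Int.floordiv 8 2) - 1).toNat (PySem.Int.floordiv 8 2).toNat "W"
    let board := pvSetCell board (PySem.Int.floordiv 8 2).toNat ((PySem.Int.floordiv 8 2) - 1).toNat "W"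
    board
  else
    board

-- ===== PORT B =====
-- centre_col(top, bottom) = blank[:h-1] + [top, bottom] + blank[h+1:]
def pvCentreCol (blank : List String) (h : Int) (top bottom : String) : List String :=
  PySem.List.slice blank none (some (h - 1)) ++ [top, bottom] ++ PySem.List.slice blank (some (h + 1)) none

def new_game_board_py_alt (reverse : String) : List (List String) :=
  -- pieces = {'False': 'WB', 'True': 'BW'}.get(reverse); if pieces is None: return []
  match PySem.Dict.get? (PySem.Dict.ofList [("False", "WB"), ("True", "BW")]) reverse with
  | none => []
  | some pieces =>
    let blank : List String := List.replicate 8 " "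
    let h : Int := PySem.Int.floordiv 8 2
    let side : Int := PySem.Int.floordiv 8 2 - 1
    let p0 := String.singleton ((PySem.Str.pyGet? pieces 0).getD ' ')   -- pieces[0]; in range by construction
    let p1 := String.singleton ((PySem.Str.pyGet? pieces 1).getD ' ')
    (PySem.List.pyRange 0 side 1).map (fun _ => blank)
      ++ [pvCentreCol blank h p0 p1, pvCentreCol blank h p1 p0]
      ++ (PySem.List.pyRange 0 side 1).map (fun _ => blank)

-- ===== PRECONDITION & SPEC =====
def Spec_new_game_board_py (reverse : String) (out : List (List String)) : Prop := out = new_game_board_py_alt reverse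
instance (reverse : String) (out : List (List String)) : Decidable (Spec_new_game_board_py reverse out) := by unfold Spec_new_game_board_py; infer_instance

-- ===== CLAIM (what is proved, stated in full; the proofs are below) =====
def Claim_equal_new_game_board_py : Prop := ∀ (reverse : String), Dom_new_game_board_py reverse → Spec_new_game_board_py reverse (new_game_board_py reverse)

-- ===== LEMMAS AND PROOFS =====

-- ===== VERDICT (by name: the statement is the Claim_ definition above) =====
theorem new_game_board_py_spec : Claim_equal_new_game_board_py := by
  intro reverse _
  unfold Spec_new_game_board_py
  by_cases h1 : reverse = "False"
  · subst h1; decide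
  · by_cases h2 : reverse = "True"
    · subst h2; decide
    · have e1 : ("False" == reverse) = false := beq_eq_false_iff_ne.mpr (Ne.symm h1)
      have e2 : ("True" == reverse) = false := beq_eq_false_iff_ne.mpr (Ne.symm h2)
      simp [new_game_board_py, new_game_board_py_alt, PySem.Dict.get?, PySem.Dict.ofList,
        PySem.Dict.update, PySem.Dict.empty, PySem.Dict.insert, List.find?, h1, h2, e1, e2]
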